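-- pv_equiv track=rewrite | github.com/mwisnowski/mtg_python_deckbuilder | code/web/routes/build.py | _color_code
-- ===== SOURCE A (Python) =====
-- from typing import Any, Iterable
--
-- _WUBRG_ORDER = ("W", "U", "B", "R", "G", "C")
--
-- def _color_code(identity: Iterable[str]) -> str:
--     colors = [str(c).strip().upper() for c in identity if str(c).strip()]
--     if not colors:
--         return "C"
--     ordered: list[str] = [c for c in _WUBRG_ORDER if c in colors]
--     for color in colors:
--         if color not in ordered:
--             ordered.append(color)
--     return "".join(ordered) or "C"
-- ===== SOURCE B (Python) =====
-- _WUBRG_ORDER = ("W", "U", "B", "R", "G", "C")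
--
-- def _color_code(identity):
--     cleaned = (str(c).strip() for c in identity)
--     uniq = list(dict.fromkeys(t.upper() for t in cleaned if t))
--     uniq.sort(key=lambda t: _WUBRG_ORDER.index(t) if t in _WUBRG_ORDER else len(_WUBRG_ORDER))
--     return "".join(uniq) or "C"
-- ===== Notes on version B (the rewrite author's own statement) =====
-- stated objective: faster
-- what changed: A builds the result in two staged passes (filter _WUBRG_ORDER by list membership in the cleaned token list, then an append-if-absent loop that rescans the growing result for every token); B instead dedups the cleaned tokens once with dict.fromkeys and stably sorts the unique tokens under a WUBRG-rank key with a sentinel for unknown tokens.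
import Mathlib
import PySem

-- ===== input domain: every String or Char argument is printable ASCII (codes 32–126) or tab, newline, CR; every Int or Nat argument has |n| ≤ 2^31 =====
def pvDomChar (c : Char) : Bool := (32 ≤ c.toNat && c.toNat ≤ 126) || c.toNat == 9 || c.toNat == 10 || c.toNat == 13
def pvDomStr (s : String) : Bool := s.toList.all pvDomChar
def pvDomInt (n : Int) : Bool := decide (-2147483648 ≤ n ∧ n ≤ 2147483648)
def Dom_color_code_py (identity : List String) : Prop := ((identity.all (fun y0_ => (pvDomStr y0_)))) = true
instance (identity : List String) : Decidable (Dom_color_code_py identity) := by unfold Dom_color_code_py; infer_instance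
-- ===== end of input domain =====

-- B replaces A's two staged membership-scanning passes with a dedup (dict.fromkeys) followed by a
-- stable sort under a WUBRG-rank key with a sentinel for unknown tokens; objective: faster (measured).

-- the module constant _WUBRG_ORDER
def pvWUBRG : List String := ["W", "U", "B", "R", "G", "C"]

-- ===== PORT A =====
def color_code_py (identity : List String) : String :=
  -- colors = [str(c).strip().upper() for c in identity if str(c).strip()]
  let colors := identity.filterMap (fun c =>
    let t := PySem.Str.strip c
    if t = "" then none else some (PySem.Str.upper t))
  if colors = [] then "C"
  else
    -- ordered = [c for c in _WUBRG_ORDER if c in colors]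
    let ordered := pvWUBRG.filter (fun c => colors.contains c)
    -- for color in colors: if color not in ordered: ordered.append(color)
    let ordered := colors.foldl (fun acc color =>
      if acc.contains color then acc else acc ++ [color]) ordered
    -- return "".join(ordered) or "C"
    let s := PySem.Str.join "" ordered
    if s = "" then "C" else s

-- ===== PORT B =====
-- key: _WUBRG_ORDER.index(t) if t in _WUBRG_ORDER else len(_WUBRG_ORDER)
def pvRank (t : String) : Int :=
  if pvWUBRG.contains t then ((pvWUBRG.idxOf t : Nat) : Int) else 6

def color_code_py_alt (identity : List String) : String :=
  -- uniq = list(dict.fromkeys(t.upper() for t in cleaned if t))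
  let uniq := PySem.List.dedup (identity.filterMap (fun c =>
    let t := PySem.Str.strip c
    if t = "" then none else some (PySem.Str.upper t)))
  -- uniq.sort(key=…)  (stable)
  let ordered := PySem.List.sorted uniq pvRank
  -- return "".join(uniq) or "C"
  let s := PySem.Str.join "" ordered
  if s = "" then "C" else s

-- ===== PRECONDITION & SPEC =====
def Spec_color_code_py (identity : List String) (out : String) : Prop := out = color_code_py_alt identity
instance (identity : List String) (out : String) : Decidable (Spec_color_code_py identity out) := by unfold Spec_color_code_py; infer_instance

-- ===== CLAIM (what is proved, stated in full; the proofs are below) =====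
def Claim_equal_color_code_py : Prop := ∀ (identity : List String), Dom_color_code_py identity → Spec_color_code_py identity (color_code_py identity)

-- ===== LEMMAS AND PROOFS =====

-- the two blocks of the canonical answer: WUBRG members present in p, and non-WUBRG tokens of p
def pvW (p : List String) : List String := pvWUBRG.filter (fun c => p.contains c)
def pvX (p : List String) : List String := p.filter (fun t => !pvWUBRG.contains t)

-- first-occurrence extras of A's append loop: new non-WUBRG tokens in order, relative to a seen set
def pvE (seen : PySem.Set String) : List String → List String
  | [] => []
  | c :: cs =>
      if PySem.Set.contains seen c then pvE seen cs
      else if pvWUBRG.contains c then pvE (PySem.Set.add seen c) cs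
      else c :: pvE (PySem.Set.add seen c) cs

-- first-occurrence-new tokens relative to a seen set (dedup continued from seen)
def pvNew (seen : PySem.Set String) : List String → List String
  | [] => []
  | c :: cs =>
      if PySem.Set.contains seen c then pvNew seen cs
      else c :: pvNew (PySem.Set.add seen c) cs

lemma pv_mem_of_contains {l : List String} {c : String} (h : l.contains c = true) : c ∈ l :=
  List.mem_of_elem_eq_true h

lemma pv_not_mem_of_contains {l : List String} {c : String} (h : l.contains c = false) : c ∉ l :=
  fun hm => by rw [List.contains_eq_mem, decide_eq_true hm] at h; exact Bool.noConfusion h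

lemma pv_contains_add (s : PySem.Set String) (x y : String) :
    PySem.Set.contains (PySem.Set.add s x) y = (PySem.Set.contains s y || y == x) := by
  by_cases hyx : y = x
  · subst hyx
    simp only [PySem.Set.add, PySem.Set.contains]
    split_ifs with h
    · simp only [List.contains_eq_mem, decide_eq_true_eq] at h
      simp [h]
    · simp
  · simp only [PySem.Set.add, PySem.Set.contains]
    split_ifs with h
    · simp [hyx]
    · simp [hyx]

-- A's append-if-new loop, characterised through pvE
lemma pv_loop_E (cs : List String) (acc : List String) (seen : PySem.Set String)
    (h1 : ∀ c ∈ cs, pvWUBRG.contains c = true → acc.contains c = true)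
    (h2 : ∀ c : String, pvWUBRG.contains c = false → acc.contains c = PySem.Set.contains seen c) :
    cs.foldl (fun a x => if a.contains x then a else a ++ [x]) acc = acc ++ pvE seen cs := by
  induction cs generalizing acc seen with
  | nil => simp [pvE]
  | cons c cs ih =>
      simp only [List.foldl_cons, pvE]
      by_cases hw : pvWUBRG.contains c = true
      · have hacc : acc.contains c = true := h1 c (List.mem_cons_self) hw
        rw [if_pos hacc]
        by_cases hs : PySem.Set.contains seen c = true
        · rw [if_pos hs]
          exact ih acc seen (fun x hx => h1 x (List.mem_cons_of_mem _ hx)) h2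
        · rw [if_neg hs, if_pos hw]
          refine ih acc (PySem.Set.add seen c)
            (fun x hx => h1 x (List.mem_cons_of_mem _ hx)) (fun x hxw => ?_)
          rw [pv_contains_add, h2 x hxw]
          have hxc : (x == c) = false := by
            rw [beq_eq_false_iff_ne]
            intro hxc; subst hxc; rw [hw] at hxw; exact Bool.noConfusion hxw
          rw [hxc, Bool.or_false]
      · have hw' : pvWUBRG.contains c = false := Bool.eq_false_iff.mpr hw
        have hacc : acc.contains c = PySem.Set.contains seen c := h2 c hw'
        by_cases hs : PySem.Set.contains seen c = true
        · rw [if_pos (hacc.trans hs), if_pos hs]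
          exact ih acc seen (fun x hx => h1 x (List.mem_cons_of_mem _ hx)) h2
        · have hs' : PySem.Set.contains seen c = false := Bool.eq_false_iff.mpr hs
          rw [if_neg (by rw [hacc, hs']; exact Bool.noConfusion), if_neg hs, if_neg hw]
          have hrw : acc ++ c :: pvE (PySem.Set.add seen c) cs
              = (acc ++ [c]) ++ pvE (PySem.Set.add seen c) cs := by simp
          rw [hrw]
          refine ih (acc ++ [c]) (PySem.Set.add seen c) (fun x hx hxw => ?_) (fun x hxw => ?_)
          · simp only [List.contains_eq_mem, List.mem_append, decide_eq_true_eq]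
            left
            have := h1 x (List.mem_cons_of_mem _ hx) hxw
            simpa [List.contains_eq_mem] using this
          · rw [pv_contains_add, ← h2 x hxw]
            simp [List.contains_eq_mem, beq_eq_decide]

-- pvE is the non-WUBRG filter of the new tokens
lemma pvE_eq_filter (seen : PySem.Set String) (cs : List String) :
    pvE seen cs = (pvNew seen cs).filter (fun t => !pvWUBRG.contains t) := by
  induction cs generalizing seen with
  | nil => rfl
  | cons c cs ih =>
      simp only [pvE, pvNew]
      by_cases hs : PySem.Set.contains seen c = true
      · rw [if_pos hs, if_pos hs, ih]
      · rw [if_neg hs, if_neg hs, List.filter_cons]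
        by_cases hw : pvWUBRG.contains c = true
        · rw [if_pos hw, ih, if_neg (by rw [hw]; simp)]
        · have hw' : pvWUBRG.contains c = false := Bool.eq_false_iff.mpr hw
          rw [if_neg hw, ih, if_pos (by rw [hw']; rfl)]

-- the seen-set fold (dict.fromkeys) appends exactly the new tokens
lemma pv_ofList_from (cs : List String) (seen : PySem.Set String) :
    cs.foldl PySem.Set.add seen = seen ++ pvNew seen cs := by
  induction cs generalizing seen with
  | nil => simp [pvNew]
  | cons c cs ih =>
      simp only [List.foldl_cons, pvNew]
      by_cases hs : PySem.Set.contains seen c = true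
      · have hadd : PySem.Set.add seen c = seen := by
          simp only [PySem.Set.add]
          split_ifs
          rfl
        rw [if_pos hs, hadd, ih]
      · have hadd : PySem.Set.add seen c = seen ++ [c] := by
          simp only [PySem.Set.add]
          split_ifs
          rfl
        rw [if_neg hs, ih, hadd, List.append_assoc]
        rfl

lemma pv_dedup_eq_new (cs : List String) :
    PySem.List.dedup cs = pvNew PySem.Set.empty cs := by
  have := pv_ofList_from cs PySem.Set.empty
  simpa [PySem.List.dedup, PySem.Set.ofList, PySem.Set.empty] using this

-- ---- insertion-sort side ----

lemma pv_rank_le (y : String) : pvRank y ≤ 6 := by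
  unfold pvRank
  split_ifs with h
  · have hmem : y ∈ pvWUBRG := by simpa [List.contains_eq_mem] using h
    have := List.idxOf_lt_length_of_mem hmem
    have h6 : pvWUBRG.length = 6 := rfl
    omega
  · exact le_refl _

lemma pv_rank_extra (y : String) (hy : pvWUBRG.contains y = false) : pvRank y = 6 := by
  unfold pvRank
  rw [if_neg (fun h => Bool.noConfusion ((hy ▸ h : (false : Bool) = true)))]

lemma pv_insertBy_front (before : String → String → Bool) (x : String) (L : List String)
    (h : ∀ y ∈ L, before x y = true) :
    PySem.List.insertBy before x L = x :: L := by
  cases L with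
  | nil => rfl
  | cons y ys => simp [PySem.List.insertBy, h y (by simp)]

lemma pv_insertBy_append_left (before : String → String → Bool) (x : String)
    (L1 L2 : List String) (h : ∀ y ∈ L1, before x y = false) :
    PySem.List.insertBy before x (L1 ++ L2) = L1 ++ PySem.List.insertBy before x L2 := by
  induction L1 with
  | nil => simp
  | cons y ys ih =>
      have hy : before x y = false := h y (by simp)
      simp only [List.cons_append, PySem.List.insertBy, hy]
      simp only [Bool.false_eq_true, if_false, List.cons.injEq, true_and]
      exact ih (fun z hz => h z (List.mem_cons_of_mem _ hz))

lemma pv_contains_append_single (p : List String) (x c : String) (hne : c ≠ x) :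
    (p ++ [x]).contains c = p.contains c := by
  simp [List.contains_eq_mem, hne]

-- inserting a WUBRG member into the canonical block + extras lands at its canonical slot
lemma pv_insert_gen (x : String) (l1 l2 : List String)
    (hsplit : pvWUBRG = l1 ++ x :: l2) (hx1 : x ∉ l1) (hx2 : x ∉ l2)
    (h1 : ∀ y ∈ l1, decide (pvRank x < pvRank y) = false)
    (h2 : ∀ y ∈ l2, decide (pvRank x < pvRank y) = true)
    (hxr : pvRank x < 6)
    (p extras : List String) (hxp : p.contains x = false)
    (hex : ∀ e ∈ extras, pvWUBRG.contains e = false) :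
    PySem.List.insertBy (fun a b => decide (pvRank a < pvRank b)) x (pvW p ++ extras)
      = pvW (p ++ [x]) ++ extras := by
  have hWp : pvW p = l1.filter (fun c => p.contains c) ++ l2.filter (fun c => p.contains c) := by
    rw [pvW, hsplit, List.filter_append, List.filter_cons,
      if_neg (by rw [hxp]; simp)]
  have hWpx : pvW (p ++ [x])
      = l1.filter (fun c => p.contains c) ++ x :: l2.filter (fun c => p.contains c) := by
    rw [pvW, hsplit, List.filter_append, List.filter_cons]
    have hx : (p ++ [x]).contains x = true := by simp [List.contains_eq_mem]
    rw [hx]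
    have hcl1 : l1.filter (fun c => (p ++ [x]).contains c) = l1.filter (fun c => p.contains c) :=
      List.filter_congr (fun c hc => pv_contains_append_single p x c (fun h => hx1 (h ▸ hc)))
    have hcl2 : l2.filter (fun c => (p ++ [x]).contains c) = l2.filter (fun c => p.contains c) :=
      List.filter_congr (fun c hc => pv_contains_append_single p x c (fun h => hx2 (h ▸ hc)))
    rw [hcl1, hcl2]
    simp
  rw [hWp, hWpx, List.append_assoc]
  rw [pv_insertBy_append_left _ _ _ _
    (fun y hy => h1 y (List.mem_of_mem_filter hy))]
  rw [pv_insertBy_front _ _ _ (fun y hy => ?_)]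
  · simp
  · rcases List.mem_append.mp hy with hyl | hye
    · exact h2 y (List.mem_of_mem_filter hyl)
    · rw [pv_rank_extra y (hex y hye)]
      exact decide_eq_true hxr

-- the insertion-sort fold keeps the answer in the canonical-block-plus-extras shape
lemma pv_fold_ins (u : List String) (p : List String) (hnd : (p ++ u).Nodup) :
    u.foldl (fun acc x => PySem.List.insertBy (fun a b => decide (pvRank a < pvRank b)) x acc)
      (pvW p ++ pvX p) = pvW (p ++ u) ++ pvX (p ++ u) := by
  induction u generalizing p with
  | nil => simp
  | cons x u ih =>
      have hnd' : (p ++ [x] ++ u).Nodup := by simpa [List.append_assoc] using hnd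
      have hxp : p.contains x = false := by
        rw [List.nodup_append] at hnd
        have hx : x ∉ p := fun hmem => hnd.2.2 x hmem x (List.mem_cons_self) rfl
        simp [List.contains_eq_mem, hx]
      have hstep : PySem.List.insertBy (fun a b => decide (pvRank a < pvRank b)) x
          (pvW p ++ pvX p) = pvW (p ++ [x]) ++ pvX (p ++ [x]) := by
        by_cases hw : pvWUBRG.contains x = true
        · have hmem : x ∈ pvWUBRG := pv_mem_of_contains hw
          have hXeq : pvX (p ++ [x]) = pvX p := by
            simp [pvX, List.filter_append, hmem]
          rw [hXeq]
          have hex : ∀ e ∈ pvX p, pvWUBRG.contains e = false := by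
            intro e he
            have := List.of_mem_filter he
            simpa using this
          simp only [pvWUBRG, List.mem_cons, List.not_mem_nil, or_false] at hmem
          rcases hmem with h | h | h | h | h | h <;> subst h
          · exact pv_insert_gen _ [] ["U","B","R","G","C"] rfl (by decide) (by decide)
              (by decide) (by decide) (by decide) p (pvX p) hxp hex
          · exact pv_insert_gen _ ["W"] ["B","R","G","C"] rfl (by decide) (by decide)
              (by decide) (by decide) (by decide) p (pvX p) hxp hex
          · exact pv_insert_gen _ ["W","U"] ["R","G","C"] rfl (by decide) (by decide)
              (by decide) (by decide) (by decide) p (pvX p) hxp hex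
          · exact pv_insert_gen _ ["W","U","B"] ["G","C"] rfl (by decide) (by decide)
              (by decide) (by decide) (by decide) p (pvX p) hxp hex
          · exact pv_insert_gen _ ["W","U","B","R"] ["C"] rfl (by decide) (by decide)
              (by decide) (by decide) (by decide) p (pvX p) hxp hex
          · exact pv_insert_gen _ ["W","U","B","R","G"] [] rfl (by decide) (by decide)
              (by decide) (by decide) (by decide) p (pvX p) hxp hex
        · have hw' : pvWUBRG.contains x = false := Bool.eq_false_iff.mpr hw
          have hxw : x ∉ pvWUBRG := pv_not_mem_of_contains hw'
          have hWeq : pvW (p ++ [x]) = pvW p :=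
            List.filter_congr (fun c hc => pv_contains_append_single p x c (fun h => hxw (h ▸ hc)))
          have hXeq : pvX (p ++ [x]) = pvX p ++ [x] := by
            simp [pvX, List.filter_append, hxw]
          rw [hWeq, hXeq,
            PySem.List.insertBy_of_forall_not_before _ _ _ (fun y hy => ?_), List.append_assoc]
          have hry : pvRank y ≤ 6 := pv_rank_le y
          have hrx : pvRank x = 6 := pv_rank_extra x hw'
          rw [hrx]
          exact decide_eq_false (by omega)
      simp only [List.foldl_cons]
      rw [hstep, ih (p ++ [x]) hnd', List.append_assoc]
      rfl

-- the stable sort under pvRank of a duplicate-free list IS canonical block ++ extras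
lemma pv_sorted_eq (u : List String) (hu : u.Nodup) :
    PySem.List.sorted u pvRank = pvW u ++ pvX u := by
  rw [PySem.List.sorted_eq_foldl_insertBy]
  have h0 : pvW ([] : List String) ++ pvX ([] : List String) = [] := by decide
  have := pv_fold_ins u [] (by simpa using hu)
  rw [h0] at this
  simpa using this

-- ===== VERDICT (by name: the statement is the Claim_ definition above) =====
theorem color_code_py_spec : Claim_equal_color_code_py := by
  intro identity _hdom
  unfold Spec_color_code_py
  simp only [color_code_py, color_code_py_alt]
  generalize identity.filterMap (fun c =>
    let t := PySem.Str.strip c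
    if t = "" then none else some (PySem.Str.upper t)) = colors
  by_cases hnil : colors = []
  · subst hnil
    rfl
  · rw [if_neg hnil]
    have hnd : (PySem.List.dedup colors).Nodup := PySem.List.nodup_dedup colors
    have hsorted := pv_sorted_eq (PySem.List.dedup colors) hnd
    have hW : pvW (PySem.List.dedup colors) = pvW colors := by
      refine List.filter_congr (fun c _ => ?_)
      simp [List.contains_eq_mem]
    have hX : pvX (PySem.List.dedup colors) = pvE PySem.Set.empty colors := by
      rw [pvX, pv_dedup_eq_new, ← pvE_eq_filter]
    have hloop : colors.foldl (fun acc color => if acc.contains color then acc else acc ++ [color])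
          (pvWUBRG.filter (fun c => colors.contains c))
        = pvWUBRG.filter (fun c => colors.contains c) ++ pvE PySem.Set.empty colors := by
      refine pv_loop_E colors _ PySem.Set.empty (fun c hc hw => ?_) (fun c hw => ?_)
      · simp only [List.contains_eq_mem, List.mem_filter, decide_eq_true_eq]
        constructor
        · simpa [List.contains_eq_mem] using hw
        · simp [hc]
      · have hc : c ∉ pvWUBRG := by
          intro hmem
          rw [List.contains_eq_mem, decide_eq_true hmem] at hw
          exact Bool.noConfusion hw
        simp [PySem.Set.contains, PySem.Set.empty, List.contains_eq_mem, List.mem_filter, hc]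
    rw [hloop, hsorted, hW, hX]
    rfl
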